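-- pv_equiv track=rewrite | github.com/jaehong9809/Algorithm_Java | 프로그래머스/2/12913. 땅따먹기/땅따먹기.py | solution
-- ===== SOURCE A (Python) =====
-- def solution(land):
--     dp = []
--     dp.append(land[0])
--     for i in range(1, len(land)):
--         tmp = [0, 0, 0, 0]
--         tmp[0] = max(dp[i-1][1], dp[i-1][2],dp[i-1][3]) + land[i][0]
--         tmp[1] = max(dp[i-1][0], dp[i-1][2],dp[i-1][3]) + land[i][1]
--         tmp[2] = max(dp[i-1][0], dp[i-1][1],dp[i-1][3]) + land[i][2]
--         tmp[3] = max(dp[i-1][1], dp[i-1][2],dp[i-1][0]) + land[i][3]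
--         dp.append(tmp)
--
--     return max(dp[len(land)-1])
-- ===== SOURCE B (Python) =====
-- def solution(land):
--     prev = land[0]
--     for row in land[1:]:
--         # pass 1: argmax (first index) and the best/second-best of the previous row
--         best_i = 0
--         for j in range(1, 4):
--             if prev[j] > prev[best_i]:
--                 best_i = j
--         best = prev[best_i]
--         second = max(prev[j] for j in range(4) if j != best_i)
--         # pass 2: new dp row from the top-2 summary only
--         prev = [row[c] + (second if c == best_i else best) for c in range(4)]
--     return max(prev)
-- ===== Notes on version B (the rewrite author's own statement) =====
-- stated objective: alternative
-- what changed: B keeps only the previous dp row and, in a separate pass per row, precomputes that row's argmax index, best and second-best values, then builds the new row as land[i][c] plus (second-best if c equals the argmax index, else best), instead of A's full dp table with four hand-written max-of-three expressions.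
import Mathlib
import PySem

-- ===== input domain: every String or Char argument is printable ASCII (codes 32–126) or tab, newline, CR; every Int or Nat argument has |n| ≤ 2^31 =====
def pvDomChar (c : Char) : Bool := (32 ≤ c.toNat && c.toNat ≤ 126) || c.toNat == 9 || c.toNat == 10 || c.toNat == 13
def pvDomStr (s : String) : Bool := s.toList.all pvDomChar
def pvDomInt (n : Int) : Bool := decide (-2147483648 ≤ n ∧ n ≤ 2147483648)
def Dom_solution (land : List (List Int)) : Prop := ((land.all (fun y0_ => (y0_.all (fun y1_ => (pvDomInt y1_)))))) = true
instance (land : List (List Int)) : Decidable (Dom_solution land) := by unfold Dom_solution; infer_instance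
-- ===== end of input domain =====

-- B replaces A's full dp table and four hand-written max-of-three expressions by a rolling
-- previous row plus a separate top-2 (argmax index / best / second-best) precompute per row.

-- ===== PORT A =====
-- the loop body: tmp built from dp[i-1] and land[i], then dp.append(tmp)
def pvStepA (land : List (List Int)) (dp : List (List Int)) (i : Int) : List (List Int) :=
  let prev := PySem.List.pyGetD dp (i - 1) []
  let row := PySem.List.pyGetD land i []
  let tmp : List Int :=
    [ max (max (PySem.List.pyGetD prev 1 0) (PySem.List.pyGetD prev 2 0)) (PySem.List.pyGetD prev 3 0) + PySem.List.pyGetD row 0 0,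
      max (max (PySem.List.pyGetD prev 0 0) (PySem.List.pyGetD prev 2 0)) (PySem.List.pyGetD prev 3 0) + PySem.List.pyGetD row 1 0,
      max (max (PySem.List.pyGetD prev 0 0) (PySem.List.pyGetD prev 1 0)) (PySem.List.pyGetD prev 3 0) + PySem.List.pyGetD row 2 0,
      max (max (PySem.List.pyGetD prev 1 0) (PySem.List.pyGetD prev 2 0)) (PySem.List.pyGetD prev 0 0) + PySem.List.pyGetD row 3 0 ]
  dp ++ [tmp]

def solution (land : List (List Int)) : Int :=
  let dp : List (List Int) := [] ++ [PySem.List.pyGetD land 0 []]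
  let dp := (PySem.List.pyRange 1 (PySem.List.len land) 1).foldl (pvStepA land) dp
  (PySem.List.max? (PySem.List.pyGetD dp (PySem.List.len land - 1) []) (fun x => x)).getD 0

-- ===== PORT B =====
-- one row of B: top-2 summary of prev, then the new row from it
def pvStepB (prev row : List Int) : List Int :=
  let bi := (PySem.List.pyRange 1 4 1).foldl
    (fun bi j => if PySem.List.pyGetD prev bi 0 < PySem.List.pyGetD prev j 0 then j else bi) 0
  let best := PySem.List.pyGetD prev bi 0
  let second := (PySem.List.max?
      (((PySem.List.pyRange 0 4 1).filter (fun j => j != bi)).map (fun j => PySem.List.pyGetD prev j 0))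
      (fun x => x)).getD 0
  (PySem.List.pyRange 0 4 1).map (fun c =>
    PySem.List.pyGetD row c 0 + if c = bi then second else best)

def solution_alt (land : List (List Int)) : Int :=
  let prev := (PySem.List.slice land (some 1) none).foldl pvStepB (PySem.List.pyGetD land 0 [])
  (PySem.List.max? prev (fun x => x)).getD 0

-- ===== PRECONDITION & SPEC =====
-- Pre_ excludes exactly the inputs on which the Python A raises IndexError / ValueError:
-- empty land, a single empty first row, or (with ≥ 2 rows) some row shorter than 4.
def Pre_solution (land : List (List Int)) : Prop :=
  land ≠ [] ∧ land.getD 0 [] ≠ [] ∧ (land.length = 1 ∨ ∀ r ∈ land, 4 ≤ r.length)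
instance (land : List (List Int)) : Decidable (Pre_solution land) := by unfold Pre_solution; infer_instance
def pvWitness_solution : List (List Int) := [[1, 2, 3, 5], [5, 6, 7, 8], [4, 3, 2, 1]]

def Spec_solution (land : List (List Int)) (out : Int) : Prop := out = solution_alt land
instance (land : List (List Int)) (out : Int) : Decidable (Spec_solution land out) := by unfold Spec_solution; infer_instance

-- ===== CLAIM (what is proved, stated in full; the proofs are below) =====
def Claim_equal_solution : Prop := ∀ (land : List (List Int)), Dom_solution land → Pre_solution land → Spec_solution land (solution land)

-- ===== LEMMAS AND PROOFS =====

-- B's fold over the first k tail rows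
def pvBfold (land : List (List Int)) (k : Nat) : List Int :=
  ((land.drop 1).take k).foldl pvStepB (PySem.List.pyGetD land 0 [])

-- the top-2 computation over abstract projections p (prev) and r (row)
lemma pv_core (p r : Int → Int) :
    (let bi := ([1,2,3] : List Int).foldl (fun bi j => if p bi < p j then j else bi) 0
     let best := p bi
     let second := (PySem.List.max? ((([0,1,2,3] : List Int).filter (fun j => j != bi)).map p) (fun x => x)).getD 0
     ([0,1,2,3] : List Int).map (fun c => r c + if c = bi then second else best))
    = [ max (max (p 1) (p 2)) (p 3) + r 0,
        max (max (p 0) (p 2)) (p 3) + r 1,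
        max (max (p 0) (p 1)) (p 3) + r 2,
        max (max (p 1) (p 2)) (p 0) + r 3 ] := by
  simp only [List.foldl]
  split_ifs <;>
    simp [List.filter, PySem.List.max?_id_cons, List.foldl] <;>
    refine ⟨?_, ?_, ?_, ?_⟩ <;> (try split_ifs) <;> omega

-- A's per-row tmp equals B's top-2 construction, for every prev and row
lemma step_eq (prev row : List Int) :
    pvStepB prev row =
      [ max (max (PySem.List.pyGetD prev 1 0) (PySem.List.pyGetD prev 2 0)) (PySem.List.pyGetD prev 3 0) + PySem.List.pyGetD row 0 0,
        max (max (PySem.List.pyGetD prev 0 0) (PySem.List.pyGetD prev 2 0)) (PySem.List.pyGetD prev 3 0) + PySem.List.pyGetD row 1 0,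
        max (max (PySem.List.pyGetD prev 0 0) (PySem.List.pyGetD prev 1 0)) (PySem.List.pyGetD prev 3 0) + PySem.List.pyGetD row 2 0,
        max (max (PySem.List.pyGetD prev 1 0) (PySem.List.pyGetD prev 2 0)) (PySem.List.pyGetD prev 0 0) + PySem.List.pyGetD row 3 0 ] := by
  have h := pv_core (fun j => PySem.List.pyGetD prev j 0) (fun c => PySem.List.pyGetD row c 0)
  simpa only [pvStepB, show PySem.List.pyRange 1 4 1 = [1,2,3] from by decide,
    show PySem.List.pyRange 0 4 1 = [0,1,2,3] from by decide] using h

-- A's growing dp list: after the indices 1..k, dp is some prefix plus B's rolling row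
lemma invA (land : List (List Int)) (k : Nat) (hk : 1 + k ≤ land.length) :
    ∃ pref : List (List Int),
      (PySem.List.pyRange 1 (1 + (k : Int)) 1).foldl (pvStepA land) [PySem.List.pyGetD land 0 []]
        = pref ++ [pvBfold land k] ∧ pref.length = k := by
  induction k with
  | zero =>
      refine ⟨[], ?_, rfl⟩
      simp [PySem.List.pyRange_one_eq_nil, pvBfold]
  | succ k ih =>
      obtain ⟨pref, heq, hlenp⟩ := ih (by omega)
      have hsplit : PySem.List.pyRange 1 (1 + ((k + 1 : Nat) : Int)) 1
          = PySem.List.pyRange 1 (1 + (k : Int)) 1 ++ [1 + (k : Int)] := by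
        have h := PySem.List.pyRange_one_succ_right (a := 1) (b := 1 + (k : Int)) (by omega)
        have hc : (1 : Int) + ((k + 1 : Nat) : Int) = (1 + (k : Int)) + 1 := by push_cast; ring
        rw [hc, h]
      rw [hsplit, List.foldl_append, heq]
      refine ⟨pref ++ [pvBfold land k], ?_, by simp [hlenp]⟩
      simp only [List.foldl]
      unfold pvStepA
      have hidx : (1 + (k : Int)) - 1 = ((k : Nat) : Int) := by ring
      have hprev : PySem.List.pyGetD (pref ++ [pvBfold land k]) ((1 + (k : Int)) - 1) []
          = pvBfold land k := by
        rw [hidx, PySem.List.pyGetD_natCast, ← hlenp]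
        simp
      have hrow : PySem.List.pyGetD land (1 + (k : Int)) [] = land.getD (1 + k) [] := by
        have hc : (1 : Int) + (k : Int) = ((1 + k : Nat) : Int) := by push_cast; ring
        rw [hc, PySem.List.pyGetD_natCast]
      have hkd : k < (land.drop 1).length := by
        simp only [List.length_drop]; omega
      have htake : (land.drop 1).take (k + 1) = (land.drop 1).take k ++ [(land.drop 1)[k]] := by
        rw [List.take_add_one, List.getElem?_eq_getElem hkd]
        rfl
      have hgd : (land.drop 1)[k] = land.getD (1 + k) [] := by
        rw [List.getElem_drop]
        rw [List.getD_eq_getElem _ _ (by omega)]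
      have hB : pvBfold land (k + 1) = pvStepB (pvBfold land k) (land.getD (1 + k) []) := by
        unfold pvBfold
        rw [htake, List.foldl_append, hgd]
        rfl
      rw [hprev, hrow, hB, step_eq]

-- ===== VERDICT (by name: the statement is the Claim_ definition above) =====
theorem solution_spec : Claim_equal_solution := by
  intro land _ hpre
  show solution land = solution_alt land
  obtain ⟨hne, -, -⟩ := hpre
  have hpos : 1 ≤ land.length := List.length_pos_iff.mpr hne
  obtain ⟨m, hm⟩ : ∃ m : Nat, land.length = 1 + m := ⟨land.length - 1, by omega⟩
  obtain ⟨pref, heq, hlenp⟩ := invA land m (by omega)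
  have hcast : (PySem.List.len land : Int) = 1 + (m : Int) := by
    rw [PySem.List.len_eq, hm]; push_cast; ring
  simp only [solution, solution_alt, List.nil_append, hcast, heq, PySem.List.slice_from_one]
  have hidx : (1 + (m : Int)) - 1 = ((m : Nat) : Int) := by ring
  have hprev : PySem.List.pyGetD (pref ++ [pvBfold land m]) ((1 + (m : Int)) - 1) []
      = pvBfold land m := by
    rw [hidx, PySem.List.pyGetD_natCast, ← hlenp]
    simp
  have hBm : pvBfold land m = land.tail.foldl pvStepB (PySem.List.pyGetD land 0 []) := by
    unfold pvBfold
    rw [← List.drop_one, List.take_of_length_le (by simp only [List.length_drop]; omega)]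
  rw [hprev, hBm]
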